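-- pv_equiv track=rewrite | github.com/Julia2300/composing_music_ml | 2_tokenizing/analysis_functions.py | get_durations_in_bins
-- ===== SOURCE A (Python) =====
-- def get_durations_in_bins(duration_dic, space):
--     """
--     Bin the durations into specified bins (space) and sum the counts for durations in each bin.
--
--     :param duration_dic: dictionary where keys are durations and values are their frequencies
--     :param space: list of bin edges
--     :return: dictionary where keys are bin edges and values are the sum of counts for durations in each bin
--     """
--     updated_duration_dic = {}
--     for i in space:
--         updated_duration_dic[i] = 0
--
--     for duration in duration_dic:
--         for i in range(len(space)-1):
--             if duration >= space[i] and duration < space[i+1]: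
--                 updated_duration_dic[space[i]] += duration_dic[duration]
--                 break
--         if duration > space[-1]:
--             updated_duration_dic[space[-1]] += duration_dic[duration]
--
--     return updated_duration_dic
-- ===== SOURCE B (Python) =====
-- def get_durations_in_bins(duration_dic, space):
--     """Bin-outermost sweep: for each consecutive bin [lo, hi) take the still-unbinned
--     durations that fall in it, shrinking the remaining list, then add overflow
--     (duration > last edge) in a final pass."""
--     bins = {}
--     for v in space:
--         bins[v] = 0
--     remaining = list(duration_dic)
--     for lo, hi in zip(space, space[1:]):
--         kept = []
--         for d in remaining:
--             if lo <= d < hi: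
--                 bins[lo] += duration_dic[d]
--             else:
--                 kept.append(d)
--         remaining = kept
--     for d in duration_dic:
--         if d > space[-1]:
--             bins[space[-1]] += duration_dic[d]
--     return bins
-- ===== Notes on version B (the rewrite author's own statement) =====
-- stated objective: alternative
-- what changed: B inverts the loop nesting: instead of A's per-duration scan over the bin edges with break, B sweeps the consecutive bin pairs outermost, maintaining a shrinking list of not-yet-binned durations (which preserves the first-match semantics), and adds the overflow contributions in a separate final pass.
import Mathlib
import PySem

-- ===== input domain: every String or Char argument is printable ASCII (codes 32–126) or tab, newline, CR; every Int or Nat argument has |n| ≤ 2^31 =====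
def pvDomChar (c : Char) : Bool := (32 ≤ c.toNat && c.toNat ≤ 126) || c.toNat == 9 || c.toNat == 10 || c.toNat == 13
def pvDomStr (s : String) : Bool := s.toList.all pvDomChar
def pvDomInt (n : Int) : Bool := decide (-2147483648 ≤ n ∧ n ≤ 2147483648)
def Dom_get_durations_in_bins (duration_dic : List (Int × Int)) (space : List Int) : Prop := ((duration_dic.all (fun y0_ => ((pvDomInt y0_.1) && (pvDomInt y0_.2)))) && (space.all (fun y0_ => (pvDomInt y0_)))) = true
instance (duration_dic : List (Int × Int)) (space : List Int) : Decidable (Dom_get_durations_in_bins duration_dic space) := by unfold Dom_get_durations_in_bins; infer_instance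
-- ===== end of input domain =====

-- B inverts the loop nesting: an outermost sweep over consecutive bin pairs with a shrinking
-- 'remaining' list replaces A's per-duration scan of the bins with break (objective: alternative).

-- ===== PORT A =====
def get_durations_in_bins (duration_dic : List (Int × Int)) (space : List Int) : List (Int × Int) :=
  let D : PySem.Dict Int Int := PySem.Dict.ofList duration_dic
  let u0 : PySem.Dict Int Int := space.foldl (fun u i => u.insert i 0) PySem.Dict.empty
  let fin : PySem.Dict Int Int := D.keys.foldl (fun u d =>
    let u1 : PySem.Dict Int Int :=
      match (List.range (space.length - 1)).find? (fun (i : Nat) =>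
          decide (PySem.List.pyGetD space (i : Int) 0 ≤ d ∧ d < PySem.List.pyGetD space ((i : Int) + 1) 0)) with
      | some i => u.modify (PySem.List.pyGetD space (i : Int) 0) 0 (· + D.getD d 0)
      | none => u
    match PySem.List.pyGet? space (-1) with
    | some last => if last < d then u1.modify last 0 (· + D.getD d 0) else u1
    | none => u1) u0
  fin.items

-- ===== PORT B =====
def get_durations_in_bins_alt (duration_dic : List (Int × Int)) (space : List Int) : List (Int × Int) :=
  let D : PySem.Dict Int Int := PySem.Dict.ofList duration_dic
  let bins0 : PySem.Dict Int Int := space.foldl (fun u v => u.insert v 0) PySem.Dict.empty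
  let st : PySem.Dict Int Int × List Int :=
    (space.zip (PySem.List.slice space (some 1) none)).foldl
      (fun st lohi =>
        st.2.foldl (fun bk d =>
          if decide (lohi.1 ≤ d ∧ d < lohi.2) then (bk.1.modify lohi.1 0 (· + D.getD d 0), bk.2)
          else (bk.1, bk.2 ++ [d])) (st.1, ([] : List Int)))
      (bins0, D.keys)
  let fin : PySem.Dict Int Int := D.keys.foldl (fun b d =>
    match PySem.List.pyGet? space (-1) with
    | some last => if last < d then b.modify last 0 (· + D.getD d 0) else b
    | none => b) st.1
  fin.items

-- ===== PRECONDITION & SPEC =====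
-- Pre_ excludes exactly the inputs where the Python A raises IndexError (space == [] with a
-- nonempty duration_dic: A evaluates space[-1]); B raises the same IndexError there.
def Pre_get_durations_in_bins (duration_dic : List (Int × Int)) (space : List Int) : Prop :=
  duration_dic = [] ∨ space ≠ []
instance (duration_dic : List (Int × Int)) (space : List Int) : Decidable (Pre_get_durations_in_bins duration_dic space) := by unfold Pre_get_durations_in_bins; infer_instance
def pvWitness_get_durations_in_bins : (List (Int × Int)) × List Int := ([(1, 2), (5, 3)], [0, 4, 8])

def Spec_get_durations_in_bins (duration_dic : List (Int × Int)) (space : List Int) (out : List (Int × Int)) : Prop := out = get_durations_in_bins_alt duration_dic space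
instance (duration_dic : List (Int × Int)) (space : List Int) (out : List (Int × Int)) : Decidable (Spec_get_durations_in_bins duration_dic space out) := by unfold Spec_get_durations_in_bins; infer_instance

-- ===== CLAIM (what is proved, stated in full; the proofs are below) =====
def Claim_equal_get_durations_in_bins : Prop := ∀ (duration_dic : List (Int × Int)) (space : List Int), Dom_get_durations_in_bins duration_dic space → Pre_get_durations_in_bins duration_dic space → Spec_get_durations_in_bins duration_dic space (get_durations_in_bins duration_dic space)

-- ===== LEMMAS AND PROOFS =====

-- Proof-side names for the pieces of the two ports.
def pvWgt (D : PySem.Dict Int Int) (d : Int) : Int := D.getD d 0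

def pvBins0 (S : List Int) : PySem.Dict Int Int :=
  S.foldl (fun u v => u.insert v 0) PySem.Dict.empty

def pvStepA (S : List Int) (D : PySem.Dict Int Int) (u : PySem.Dict Int Int) (d : Int) :
    PySem.Dict Int Int :=
  let u1 : PySem.Dict Int Int :=
    match (List.range (S.length - 1)).find? (fun (i : Nat) =>
        decide (PySem.List.pyGetD S (i : Int) 0 ≤ d ∧ d < PySem.List.pyGetD S ((i : Int) + 1) 0)) with
    | some i => u.modify (PySem.List.pyGetD S (i : Int) 0) 0 (· + D.getD d 0)
    | none => u
  match PySem.List.pyGet? S (-1) with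
  | some last => if last < d then u1.modify last 0 (· + D.getD d 0) else u1
  | none => u1

def pvStepInner (D : PySem.Dict Int Int) (lohi : Int × Int)
    (bk : PySem.Dict Int Int × List Int) (d : Int) : PySem.Dict Int Int × List Int :=
  if decide (lohi.1 ≤ d ∧ d < lohi.2) then (bk.1.modify lohi.1 0 (· + D.getD d 0), bk.2)
  else (bk.1, bk.2 ++ [d])

def pvStepOuter (D : PySem.Dict Int Int) (st : PySem.Dict Int Int × List Int)
    (lohi : Int × Int) : PySem.Dict Int Int × List Int :=
  st.2.foldl (pvStepInner D lohi) (st.1, ([] : List Int))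

def pvStepOv (S : List Int) (D : PySem.Dict Int Int) (b : PySem.Dict Int Int) (d : Int) :
    PySem.Dict Int Int :=
  match PySem.List.pyGet? S (-1) with
  | some last => if last < d then b.modify last 0 (· + D.getD d 0) else b
  | none => b

-- per-duration contributions at key k
def pvMatch (d : Int) (q : Int × Int) : Bool := decide (q.1 ≤ d ∧ d < q.2)

def pvCP (P : List (Int × Int)) (D : PySem.Dict Int Int) (d k : Int) : Int :=
  match P.find? (pvMatch d) with
  | some q => if q.1 = k then pvWgt D d else 0
  | none => 0

def pvCOV (S : List Int) (D : PySem.Dict Int Int) (d k : Int) : Int :=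
  match PySem.List.pyGet? S (-1) with
  | some last => if last < d then (if last = k then pvWgt D d else 0) else 0
  | none => 0

def pvCA (S : List Int) (D : PySem.Dict Int Int) (d k : Int) : Int :=
  (match (List.range (S.length - 1)).find? (fun (i : Nat) =>
      decide (PySem.List.pyGetD S (i : Int) 0 ≤ d ∧ d < PySem.List.pyGetD S ((i : Int) + 1) 0)) with
   | some i => if PySem.List.pyGetD S (i : Int) 0 = k then pvWgt D d else 0
   | none => 0) + pvCOV S D d k

lemma pvPortA_eq (dd : List (Int × Int)) (S : List Int) :
    get_durations_in_bins dd S =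
      ((PySem.Dict.ofList dd).keys.foldl (pvStepA S (PySem.Dict.ofList dd)) (pvBins0 S)).items := rfl

lemma pvPortB_eq (dd : List (Int × Int)) (S : List Int) :
    get_durations_in_bins_alt dd S =
      ((PySem.Dict.ofList dd).keys.foldl (pvStepOv S (PySem.Dict.ofList dd))
        (((S.zip S.tail).foldl (pvStepOuter (PySem.Dict.ofList dd))
          (pvBins0 S, (PySem.Dict.ofList dd).keys)).1)).items := by
  unfold get_durations_in_bins_alt
  rw [PySem.List.slice_from_one]
  rfl

-- value of a dict after one 'bins[key] += c' at an arbitrary key k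
lemma pvGetD_modify_add (b : PySem.Dict Int Int) (key k c : Int) :
    (b.modify key 0 (· + c)).getD k 0 = b.getD k 0 + (if key = k then c else 0) := by
  rw [PySem.Dict.getD_modify]
  by_cases h : k = key
  · simp [h]
  · have h' : ¬ key = k := fun hh => h hh.symm
    simp [h, h']

-- zip of S with its tail, described by indices
lemma pvZip_tail (S : List Int) :
    S.zip S.tail = (List.range (S.length - 1)).map
      (fun (i : Nat) => (PySem.List.pyGetD S (i : Int) 0, PySem.List.pyGetD S ((i : Int) + 1) 0)) := by
  apply List.ext_getElem
  · simp [List.length_zip, List.length_tail]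
  · intro i h1 h2
    have hlen : i < S.length - 1 := by simpa using h2
    have hi : i < S.length := by omega
    have hi1 : i + 1 < S.length := by omega
    simp only [List.getElem_zip, List.getElem_map, List.getElem_range]
    rw [List.getElem_tail, PySem.List.pyGetD_ofNat S i 0 hi]
    have hcast : ((i : Int) + 1) = ((i + 1 : Nat) : Int) := by push_cast; ring
    rw [hcast, PySem.List.pyGetD_ofNat S (i + 1) 0 hi1]

-- index-form first-match contribution = pair-form first-match contribution
lemma pvCA_eq (S : List Int) (D : PySem.Dict Int Int) (d k : Int) :
    pvCA S D d k = pvCP (S.zip S.tail) D d k + pvCOV S D d k := by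
  unfold pvCA pvCP
  congr 1
  rw [pvZip_tail, List.find?_map]
  have hcomp : (pvMatch d ∘ fun i : Nat =>
      (PySem.List.pyGetD S (i : Int) 0, PySem.List.pyGetD S ((i : Int) + 1) 0))
      = (fun i : Nat => decide (PySem.List.pyGetD S (i : Int) 0 ≤ d ∧
          d < PySem.List.pyGetD S ((i : Int) + 1) 0)) := rfl
  rw [hcomp]
  cases hf : (List.range (S.length - 1)).find? (fun i : Nat =>
      decide (PySem.List.pyGetD S (i : Int) 0 ≤ d ∧ d < PySem.List.pyGetD S ((i : Int) + 1) 0)) with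
  | none => simp
  | some i => simp

-- A-side accumulation
lemma pvFoldA (S : List Int) (D : PySem.Dict Int Int) (K : List Int)
    (u : PySem.Dict Int Int) (k : Int) :
    (K.foldl (pvStepA S D) u).getD k 0 = u.getD k 0 + (K.map (fun d => pvCA S D d k)).sum := by
  induction K generalizing u with
  | nil => simp
  | cons d K ih =>
    have hstep : (pvStepA S D u d).getD k 0 = u.getD k 0 + pvCA S D d k := by
      unfold pvStepA pvCA pvCOV pvWgt
      cases hf : (List.range (S.length - 1)).find? (fun i : Nat =>
          decide (PySem.List.pyGetD S (i : Int) 0 ≤ d ∧ d < PySem.List.pyGetD S ((i : Int) + 1) 0)) with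
      | none =>
        cases hl : PySem.List.pyGet? S (-1) with
        | none => simp
        | some last =>
          by_cases hd : last < d
          · simp only [hd, if_true, pvGetD_modify_add]; ring
          · simp [hd]
      | some i =>
        cases hl : PySem.List.pyGet? S (-1) with
        | none => simp [pvGetD_modify_add]
        | some last =>
          by_cases hd : last < d
          · simp only [hd, if_true, pvGetD_modify_add]; ring
          · simp only [hd, if_false, pvGetD_modify_add]; ring
    simp only [List.foldl_cons, List.map_cons, List.sum_cons, ih, hstep]
    ring

-- sum of a pointwise if splits over the filter and its complement
lemma pvSum_ite_split (l : List Int) (p : Int → Bool) (f g : Int → Int) :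
    (l.map (fun d => if p d then f d else g d)).sum
      = ((l.filter p).map f).sum + ((l.filter (fun d => !p d)).map g).sum := by
  induction l with
  | nil => simp
  | cons x xs ih => by_cases h : p x <;> simp [h, ih] <;> ring

-- B inner fold
lemma pvFoldInner (D : PySem.Dict Int Int) (lo hi : Int) (rem : List Int)
    (b : PySem.Dict Int Int) (acc : List Int) (k : Int) :
    (rem.foldl (pvStepInner D (lo, hi)) (b, acc)).1.getD k 0
        = b.getD k 0 + ((rem.filter (fun d => pvMatch d (lo, hi))).map
            (fun d => if lo = k then pvWgt D d else 0)).sum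
      ∧ (rem.foldl (pvStepInner D (lo, hi)) (b, acc)).2
        = acc ++ rem.filter (fun d => ! pvMatch d (lo, hi)) := by
  induction rem generalizing b acc with
  | nil => simp
  | cons d rem ih =>
    by_cases hP : lo ≤ d ∧ d < hi
    · have hm : pvMatch d (lo, hi) = true := by simp [pvMatch, hP]
      have hstep : pvStepInner D (lo, hi) (b, acc) d
          = (b.modify lo 0 (· + D.getD d 0), acc) := by
        simp [pvStepInner, hP]
      obtain ⟨ih1, ih2⟩ := ih (b.modify lo 0 (· + D.getD d 0)) acc
      constructor
      · rw [List.foldl_cons, hstep, ih1, pvGetD_modify_add]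
        simp only [List.filter_cons, hm, if_true, List.map_cons, List.sum_cons, pvWgt]
        ring
      · rw [List.foldl_cons, hstep, ih2]
        simp [hm]
    · have hm : pvMatch d (lo, hi) = false := by simp [pvMatch, hP]
      have hstep : pvStepInner D (lo, hi) (b, acc) d = (b, acc ++ [d]) := by
        simp [pvStepInner, hP]
      obtain ⟨ih1, ih2⟩ := ih b (acc ++ [d])
      constructor
      · rw [List.foldl_cons, hstep, ih1]
        simp [hm]
      · rw [List.foldl_cons, hstep, ih2]
        simp [hm]

-- pvCP unfolds on a cons of the pair list
lemma pvCP_cons (lo hi : Int) (P : List (Int × Int)) (D : PySem.Dict Int Int) (d k : Int) :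
    pvCP ((lo, hi) :: P) D d k
      = if pvMatch d (lo, hi) then (if lo = k then pvWgt D d else 0) else pvCP P D d k := by
  by_cases h : pvMatch d (lo, hi)
  · simp [pvCP, h]
  · simp only [Bool.not_eq_true] at h
    simp [pvCP, h]

-- B outer fold over bin pairs
lemma pvFoldOuter (D : PySem.Dict Int Int) (P : List (Int × Int)) (b : PySem.Dict Int Int)
    (rem : List Int) (k : Int) :
    ((P.foldl (pvStepOuter D) (b, rem)).1).getD k 0
      = b.getD k 0 + (rem.map (fun d => pvCP P D d k)).sum := by
  induction P generalizing b rem with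
  | nil => simp [pvCP]
  | cons q P ih =>
    obtain ⟨lo, hi⟩ := q
    have hin := pvFoldInner D lo hi rem b [] k
    rw [List.foldl_cons]
    show ((P.foldl (pvStepOuter D) (pvStepOuter D (b, rem) (lo, hi))).1).getD k 0 = _
    have hst : pvStepOuter D (b, rem) (lo, hi)
        = ((rem.foldl (pvStepInner D (lo, hi)) (b, [])).1,
           (rem.foldl (pvStepInner D (lo, hi)) (b, [])).2) := rfl
    rw [hst, ih, hin.1, hin.2]
    simp only [List.nil_append]
    have hsplit := pvSum_ite_split rem (fun d => pvMatch d (lo, hi))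
      (fun d => if lo = k then pvWgt D d else 0) (fun d => pvCP P D d k)
    have hcong : (rem.map (fun d => pvCP ((lo, hi) :: P) D d k))
        = rem.map (fun d => if pvMatch d (lo, hi) then (if lo = k then pvWgt D d else 0)
            else pvCP P D d k) := by
      apply List.map_congr_left; intro d _; exact pvCP_cons lo hi P D d k
    rw [hcong, hsplit]
    ring

-- B overflow fold
lemma pvFoldOv (S : List Int) (D : PySem.Dict Int Int) (K : List Int)
    (b : PySem.Dict Int Int) (k : Int) :
    (K.foldl (pvStepOv S D) b).getD k 0 = b.getD k 0 + (K.map (fun d => pvCOV S D d k)).sum := by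
  induction K generalizing b with
  | nil => simp
  | cons d K ih =>
    have hstep : (pvStepOv S D b d).getD k 0 = b.getD k 0 + pvCOV S D d k := by
      unfold pvStepOv pvCOV pvWgt
      cases hl : PySem.List.pyGet? S (-1) with
      | none => simp
      | some last =>
        by_cases hd : last < d
        · simp only [hd, if_true, pvGetD_modify_add]
        · simp [hd]
    simp only [List.foldl_cons, List.map_cons, List.sum_cons, ih, hstep]
    ring

-- membership used by the keys lemmas
lemma pvLast_mem (S : List Int) (last : Int) (hl : PySem.List.pyGet? S (-1) = some last) :
    last ∈ S := by
  have h : S.getLast? = some last := by simpa [pysem] using hl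
  exact List.mem_of_getLast? h

lemma pvModify_keys_of_mem (b : PySem.Dict Int Int) (key : Int) (f : Int → Int)
    (h : key ∈ b.keys) : (b.modify key 0 f).keys = b.keys := by
  rw [PySem.Dict.keys_modify]
  exact PySem.Dict.keys_insert_of_contains b _ ((PySem.Dict.contains_iff_mem_keys b key).mpr h)

-- keys are preserved by all the modify loops
lemma pvKeysA (S : List Int) (D : PySem.Dict Int Int) (K : List Int) (u : PySem.Dict Int Int)
    (hs : ∀ x ∈ S, x ∈ u.keys) : (K.foldl (pvStepA S D) u).keys = u.keys := by
  induction K generalizing u with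
  | nil => rfl
  | cons d K ih =>
    have hkeys : (pvStepA S D u d).keys = u.keys := by
      unfold pvStepA
      have hmod1 : ∀ (v : PySem.Dict Int Int), v.keys = u.keys →
          (match (List.range (S.length - 1)).find? (fun i : Nat =>
              decide (PySem.List.pyGetD S (i : Int) 0 ≤ d ∧
                d < PySem.List.pyGetD S ((i : Int) + 1) 0)) with
            | some i => v.modify (PySem.List.pyGetD S (i : Int) 0) 0 (· + D.getD d 0)
            | none => v).keys = u.keys := by
        intro v hv
        cases hf : (List.range (S.length - 1)).find? (fun i : Nat =>
            decide (PySem.List.pyGetD S (i : Int) 0 ≤ d ∧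
              d < PySem.List.pyGetD S ((i : Int) + 1) 0)) with
        | none => exact hv
        | some i =>
          have hi : i < S.length - 1 := by
            have := List.mem_of_find?_eq_some hf
            simpa [List.mem_range] using this
          have hmem : PySem.List.pyGetD S (i : Int) 0 ∈ S := by
            rw [PySem.List.pyGetD_ofNat S i 0 (by omega)]
            exact List.getElem_mem _
          rw [pvModify_keys_of_mem v _ _ (by rw [hv]; exact hs _ hmem)]
          exact hv
      cases hl : PySem.List.pyGet? S (-1) with
      | none => exact hmod1 u rfl
      | some last =>
        by_cases hd : last < d
        · simp only [hd, if_true]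
          rw [pvModify_keys_of_mem _ _ _ (by rw [hmod1 u rfl]; exact hs _ (pvLast_mem S last hl))]
          exact hmod1 u rfl
        · simp only [hd, if_false]
          exact hmod1 u rfl
    rw [List.foldl_cons, ih (pvStepA S D u d) (by rw [hkeys]; exact hs), hkeys]

lemma pvKeysInner (D : PySem.Dict Int Int) (lo hi : Int) (rem : List Int)
    (b : PySem.Dict Int Int) (acc : List Int) (hlo : lo ∈ b.keys) :
    (rem.foldl (pvStepInner D (lo, hi)) (b, acc)).1.keys = b.keys := by
  induction rem generalizing b acc with
  | nil => rfl
  | cons d rem ih =>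
    by_cases hP : lo ≤ d ∧ d < hi
    · have hstep : pvStepInner D (lo, hi) (b, acc) d
          = (b.modify lo 0 (· + D.getD d 0), acc) := by simp [pvStepInner, hP]
      have hk := pvModify_keys_of_mem b lo (· + D.getD d 0) hlo
      rw [List.foldl_cons, hstep, ih _ acc (by rw [hk]; exact hlo), hk]
    · have hstep : pvStepInner D (lo, hi) (b, acc) d = (b, acc ++ [d]) := by
        simp [pvStepInner, hP]
      rw [List.foldl_cons, hstep, ih b (acc ++ [d]) hlo]

lemma pvKeysOuter (D : PySem.Dict Int Int) (P : List (Int × Int)) (b : PySem.Dict Int Int)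
    (rem : List Int) (hs : ∀ q ∈ P, q.1 ∈ b.keys) :
    ((P.foldl (pvStepOuter D) (b, rem)).1).keys = b.keys := by
  induction P generalizing b rem with
  | nil => rfl
  | cons q P ih =>
    obtain ⟨lo, hi⟩ := q
    have hlo : lo ∈ b.keys := hs (lo, hi) (List.mem_cons_self ..)
    have hk := pvKeysInner D lo hi rem b [] hlo
    rw [List.foldl_cons]
    show ((P.foldl (pvStepOuter D) (pvStepOuter D (b, rem) (lo, hi))).1).keys = b.keys
    have hst : pvStepOuter D (b, rem) (lo, hi)
        = ((rem.foldl (pvStepInner D (lo, hi)) (b, [])).1,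
           (rem.foldl (pvStepInner D (lo, hi)) (b, [])).2) := rfl
    rw [hst, ih _ _ (by intro p hp; rw [hk]; exact hs p (List.mem_cons_of_mem _ hp)), hk]

lemma pvKeysOv (S : List Int) (D : PySem.Dict Int Int) (K : List Int) (b : PySem.Dict Int Int)
    (hs : ∀ x ∈ S, x ∈ b.keys) : (K.foldl (pvStepOv S D) b).keys = b.keys := by
  induction K generalizing b with
  | nil => rfl
  | cons d K ih =>
    have hkeys : (pvStepOv S D b d).keys = b.keys := by
      unfold pvStepOv
      cases hl : PySem.List.pyGet? S (-1) with
      | none => rfl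
      | some last =>
        by_cases hd : last < d
        · simp only [hd, if_true]
          exact pvModify_keys_of_mem b last _ (hs last (pvLast_mem S last hl))
        · simp [hd]
    rw [List.foldl_cons, ih (pvStepOv S D b d) (by rw [hkeys]; exact hs), hkeys]

lemma pvKeysBins0 (S : List Int) : (pvBins0 S).keys = PySem.Set.update [] S := by
  unfold pvBins0
  have h := PySem.Dict.keys_foldl_insert S (fun _ _ => (0 : Int)) PySem.Dict.empty
  simpa [PySem.Dict.keys_empty] using h

lemma pvMemKeysBins0 (S : List Int) (x : Int) (hx : x ∈ S) : x ∈ (pvBins0 S).keys := by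
  rw [pvKeysBins0]
  exact (PySem.Set.mem_update _ _ _).mpr (Or.inr hx)

lemma pvNodupBins0 (S : List Int) : (pvBins0 S).keys.Nodup := by
  unfold pvBins0
  exact PySem.Dict.nodup_keys_foldl_insert S (fun _ _ => (0 : Int)) PySem.Dict.empty
    (by simp [PySem.Dict.keys_empty])

-- ===== VERDICT (by name: the statement is the Claim_ definition above) =====
theorem get_durations_in_bins_spec : Claim_equal_get_durations_in_bins := by
  intro dd S _ _
  unfold Spec_get_durations_in_bins
  rw [pvPortA_eq, pvPortB_eq]
  set D := PySem.Dict.ofList dd with hD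
  set K := D.keys with hK
  set B0 := pvBins0 S with hB0
  have hsB0 : ∀ x ∈ S, x ∈ B0.keys := fun x hx => pvMemKeysBins0 S x hx
  -- keys of both final dicts are B0's keys
  have hkA : (K.foldl (pvStepA S D) B0).keys = B0.keys := pvKeysA S D K B0 hsB0
  have hzipmem : ∀ q ∈ S.zip S.tail, q.1 ∈ B0.keys := by
    intro q hq
    obtain ⟨lo, hi⟩ := q
    exact hsB0 lo (List.of_mem_zip hq).1
  have hkOuter := pvKeysOuter D (S.zip S.tail) B0 K hzipmem
  have hkB : (K.foldl (pvStepOv S D)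
      (((S.zip S.tail).foldl (pvStepOuter D) (B0, K)).1)).keys = B0.keys := by
    rw [pvKeysOv S D K _ (by intro x hx; rw [hkOuter]; exact hsB0 x hx), hkOuter]
  -- values agree at every key
  have hval : ∀ k : Int, (K.foldl (pvStepA S D) B0).getD k 0
      = (K.foldl (pvStepOv S D) (((S.zip S.tail).foldl (pvStepOuter D) (B0, K)).1)).getD k 0 := by
    intro k
    rw [pvFoldA S D K B0 k, pvFoldOv, pvFoldOuter]
    have : (K.map (fun d => pvCA S D d k))
        = K.map (fun d => pvCP (S.zip S.tail) D d k + pvCOV S D d k) := by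
      apply List.map_congr_left; intro d _; exact pvCA_eq S D d k
    rw [this, PySem.List.sum_map_add_int]
    ring
  -- items agree
  rw [PySem.Dict.items_eq_map_keys _ (by rw [hkA]; exact pvNodupBins0 S) 0,
      PySem.Dict.items_eq_map_keys _ (by rw [hkB]; exact pvNodupBins0 S) 0,
      hkA, hkB]
  apply List.map_congr_left
  intro k _
  exact congrArg (fun v => (k, v)) (hval k)
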